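-- pv_equiv track=rewrite | github.com/samulenzz/ReTool | RequirementsManager-master/rm-server/filemanager/filemanager/api/file/uncertaindetect/UncertaintyDetectInText/getscope.py | cutscope
-- ===== SOURCE A (Python) =====
-- def cutscope(scope,cutters,iscutterin=True):
--     l=[]
--     for word in scope:
--         if word in cutters:
--             if iscutterin:
--                l.append(word)
--             return l
--         l.append(word)
--     return l
-- ===== SOURCE B (Python) =====
-- def cutscope(scope, cutters, iscutterin=True):
--     scope = list(scope)
--     for i, word in enumerate(scope):
--         if word in cutters:
--             return scope[:i + 1] if iscutterin else scope[:i]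
--     return scope
-- ===== Notes on version B (the rewrite author's own statement) =====
-- stated objective: simpler
-- what changed: B finds the index of the first word in cutters and returns one slice of scope, instead of A's append-accumulator loop with an early return.
import Mathlib
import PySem

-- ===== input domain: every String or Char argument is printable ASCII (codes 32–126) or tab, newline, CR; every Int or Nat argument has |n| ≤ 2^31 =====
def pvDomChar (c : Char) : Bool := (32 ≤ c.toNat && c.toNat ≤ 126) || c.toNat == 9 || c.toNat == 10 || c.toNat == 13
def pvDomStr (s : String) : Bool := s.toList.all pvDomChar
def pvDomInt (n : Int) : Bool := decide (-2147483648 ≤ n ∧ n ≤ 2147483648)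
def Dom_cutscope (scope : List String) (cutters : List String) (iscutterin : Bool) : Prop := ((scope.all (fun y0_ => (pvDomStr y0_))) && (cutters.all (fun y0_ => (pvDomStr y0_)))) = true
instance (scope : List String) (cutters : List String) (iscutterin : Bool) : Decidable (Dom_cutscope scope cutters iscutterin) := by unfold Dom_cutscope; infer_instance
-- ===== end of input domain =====

-- B replaces A's append-accumulator loop (with early return) by finding the index of the
-- first word in cutters and returning one slice of scope (objective: simpler).

-- ===== PORT A =====
-- A's for-loop with accumulator l and early return, as structural recursion over scope.
def cutscope_go (cutters : List String) (iscutterin : Bool) (l : List String) : List String → List String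
  | [] => l
  | word :: rest =>
      if cutters.contains word then
        (if iscutterin then l ++ [word] else l)
      else
        cutscope_go cutters iscutterin (l ++ [word]) rest

def cutscope (scope : List String) (cutters : List String) (iscutterin : Bool) : List String :=
  cutscope_go cutters iscutterin [] scope

-- ===== PORT B =====
def cutscope_alt (scope : List String) (cutters : List String) (iscutterin : Bool) : List String :=
  match scope.findIdx? (fun w => cutters.contains w) with
  | none => scope
  | some i => scope.take (if iscutterin then i + 1 else i)

-- ===== PRECONDITION & SPEC =====
def Spec_cutscope (scope : List String) (cutters : List String) (iscutterin : Bool) (out : List String) : Prop := out = cutscope_alt scope cutters iscutterin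
instance (scope : List String) (cutters : List String) (iscutterin : Bool) (out : List String) : Decidable (Spec_cutscope scope cutters iscutterin out) := by unfold Spec_cutscope; infer_instance

-- ===== CLAIM (what is proved, stated in full; the proofs are below) =====
def Claim_equal_cutscope : Prop := ∀ (scope : List String) (cutters : List String) (iscutterin : Bool), Dom_cutscope scope cutters iscutterin → Spec_cutscope scope cutters iscutterin (cutscope scope cutters iscutterin)

-- ===== LEMMAS AND PROOFS =====
-- Loop invariant: A's loop starting from accumulator l returns l ++ B's result.
theorem cutscope_go_eq (cutters : List String) (iscutterin : Bool) (scope l : List String) :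
    cutscope_go cutters iscutterin l scope = l ++ cutscope_alt scope cutters iscutterin := by
  induction scope generalizing l with
  | nil => simp [cutscope_go, cutscope_alt]
  | cons w rest ih =>
      by_cases h : w ∈ cutters
      · cases iscutterin <;>
          simp [cutscope_go, cutscope_alt, h, List.findIdx?_cons]
      · have hcons : cutscope_alt (w :: rest) cutters iscutterin =
            w :: cutscope_alt rest cutters iscutterin := by
          unfold cutscope_alt
          simp only [List.findIdx?_cons, h, decide_false, cond_false]
          cases hf : rest.findIdx? (fun w => cutters.contains w) with
          | none => simp [if_neg h]
          | some i =>
              cases iscutterin <;> simp [if_neg h, List.take_succ_cons]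
        simp [cutscope_go, h, ih, hcons]

-- ===== VERDICT (by name: the statement is the Claim_ definition above) =====
theorem cutscope_spec : Claim_equal_cutscope := by
  intro scope cutters iscutterin _
  unfold Spec_cutscope cutscope
  simpa using cutscope_go_eq cutters iscutterin scope []
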